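-- pv_equiv track=rewrite | github.com/nathan-shivers/Bio-539-Final-Exam | Pytest_Final_Exam.py | possible_substrings
-- ===== SOURCE A (Python) =====
-- def possible_substrings(sequence):
--     if type(sequence) != str: ## Checks if sequence is a string and if not prints error message
--         return("Sequence needs to be a string")
--     else:
--         sub = []
--         for i in range(1, len(sequence) + 1): ## loops through all possible lenghts of k starting at 1
--             if 4*i <= len(sequence): ## If 4k is smaller than total length of sequence than 4k is used for total possible substrings
--                 sub.append(4 * i)
--             else: ## If 4k is larger than total length of sequence than n - k + 1 is used instead
--                 sub.append((len(sequence) - i) + 1)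
--         return(sum(sub)) ## Returns the total sum of the list
-- ===== SOURCE B (Python) =====
-- def possible_substrings(sequence):
--     # Closed form: m = n//4 terms contribute 4i; the rest contribute (n-i+1),
--     # an arithmetic series 1..(n-m).
--     n = len(sequence)
--     m = n // 4
--     return 2 * m * (m + 1) + (n - m) * (n - m + 1) // 2
-- ===== Notes on version B (the rewrite author's own statement) =====
-- stated objective: faster
-- what changed: Replaced the per-length loop and intermediate list with a closed-form split at n//4: a 4i arithmetic series for i ≤ n//4 plus a triangular-number formula for the rest.
import Mathlib
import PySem

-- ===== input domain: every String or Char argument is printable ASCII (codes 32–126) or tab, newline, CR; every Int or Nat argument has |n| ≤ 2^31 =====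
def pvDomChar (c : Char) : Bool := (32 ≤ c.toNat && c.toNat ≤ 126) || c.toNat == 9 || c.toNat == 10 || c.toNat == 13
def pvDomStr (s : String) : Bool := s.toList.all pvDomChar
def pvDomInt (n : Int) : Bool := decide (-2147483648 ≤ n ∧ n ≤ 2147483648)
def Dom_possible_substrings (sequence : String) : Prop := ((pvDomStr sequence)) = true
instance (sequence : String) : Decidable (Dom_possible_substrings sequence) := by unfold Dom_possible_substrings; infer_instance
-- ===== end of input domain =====

-- B replaces A's O(n) loop by a closed-form split at n//4: two arithmetic-series formulas (objective: faster, asymptotic).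

-- ===== PORT A =====
-- literal port: build the list `sub` by appending per i in range(1, len+1), then sum it
def possible_substrings (sequence : String) : Int :=
  let n : Int := PySem.Str.len sequence
  let sub : List Int :=
    (PySem.List.pyRange 1 (n + 1)).foldl
      (fun acc i => acc ++ [if 4 * i ≤ n then 4 * i else (n - i) + 1]) []
  sub.sum

-- ===== PORT B =====
def possible_substrings_alt (sequence : String) : Int :=
  let n : Int := PySem.Str.len sequence
  let m : Int := PySem.Int.floordiv n 4
  2 * m * (m + 1) + PySem.Int.floordiv ((n - m) * (n - m + 1)) 2

-- ===== PRECONDITION & SPEC =====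
def Spec_possible_substrings (sequence : String) (out : Int) : Prop := out = possible_substrings_alt sequence
instance (sequence : String) (out : Int) : Decidable (Spec_possible_substrings sequence out) := by unfold Spec_possible_substrings; infer_instance

-- ===== CLAIM (what is proved, stated in full; the proofs are below) =====
def Claim_equal_possible_substrings : Prop := ∀ (sequence : String), Dom_possible_substrings sequence → Spec_possible_substrings sequence (possible_substrings sequence)

-- ===== LEMMAS AND PROOFS =====

-- sum of 4*i for i in range(1, k+1)
theorem pv_sum_four (k : Nat) :
    ((PySem.List.pyRange 1 ((k : Int) + 1)).map (fun i => 4 * i)).sum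
      = 2 * (k : Int) * ((k : Int) + 1) := by
  induction k with
  | zero => simp [PySem.List.pyRange_one_eq_nil]
  | succ k ih =>
      push_cast
      rw [PySem.List.pyRange_one_succ_right (by omega : (1 : Int) ≤ (k : Int) + 1)]
      simp only [List.map_append, List.sum_append, List.map_cons, List.map_nil, List.sum_cons,
        List.sum_nil]
      linarith [ih]

-- sum of (n - i + 1) for i in range(n - t + 1, n + 1), doubled
theorem pv_sum_tail (t : Nat) (n : Int) :
    ((PySem.List.pyRange (n - (t : Int) + 1) (n + 1)).map (fun i => n - i + 1)).sum * 2
      = (t : Int) * ((t : Int) + 1) := by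
  induction t with
  | zero => simp [PySem.List.pyRange_one_eq_nil]
  | succ t ih =>
      push_cast
      rw [show n - ((t : Int) + 1) + 1 = n - (t : Int) by ring]
      rw [PySem.List.pyRange_one_cons (by omega : n - (t : Int) < n + 1)]
      simp only [List.map_cons, List.sum_cons]
      nlinarith [ih]

-- ===== VERDICT (by name: the statement is the Claim_ definition above) =====
theorem possible_substrings_spec : Claim_equal_possible_substrings := by
  intro sequence _
  simp only [Spec_possible_substrings, possible_substrings, possible_substrings_alt,
    PySem.Str.len_eq]
  set L : Nat := sequence.toList.length with hL
  set M : Nat := L / 4 with hM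
  have hm : PySem.Int.floordiv (L : Int) 4 = (M : Int) := by
    exact_mod_cast PySem.Int.floordiv_natCast L 4
  have hML : M ≤ L := Nat.div_le_self _ _
  have h4M : 4 * M ≤ L := by omega
  have hlt : L < 4 * (M + 1) := by omega
  -- split A's range at M + 1
  rw [PySem.List.pyRange_one_append 1 ((M : Int) + 1) ((L : Int) + 1)
      (by omega) (by exact_mod_cast Nat.add_le_add_right hML 1)]
  rw [PySem.List.foldl_append_singleton_eq_map]
  simp only [List.nil_append, List.map_append, List.sum_append]
  have h1 : ((PySem.List.pyRange 1 ((M : Int) + 1)).map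
      (fun i => if 4 * i ≤ (L : Int) then 4 * i else ((L : Int) - i) + 1)).sum
      = 2 * M * (M + 1) := by
    rw [List.map_congr_left (g := fun i => 4 * i) ?_]
    · exact pv_sum_four M
    · intro i hi
      rw [PySem.List.mem_pyRange_one] at hi
      have : 4 * i ≤ (L : Int) := by
        have : i ≤ (M : Int) := by omega
        have : 4 * i ≤ 4 * (M : Int) := by omega
        have h4 : (4 * M : Int) ≤ (L : Int) := by exact_mod_cast h4M
        omega
      simp [this]
  have h2 : ((PySem.List.pyRange ((M : Int) + 1) ((L : Int) + 1)).map
      (fun i => if 4 * i ≤ (L : Int) then 4 * i else ((L : Int) - i) + 1)).sum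
      = ((PySem.List.pyRange ((M : Int) + 1) ((L : Int) + 1)).map
          (fun i => (L : Int) - i + 1)).sum := by
    rw [List.map_congr_left]
    intro i hi
    rw [PySem.List.mem_pyRange_one] at hi
    have : ¬ (4 * i ≤ (L : Int)) := by
      have h4 : ((L : Int)) < 4 * ((M : Int) + 1) := by exact_mod_cast hlt
      omega
    simp [this]
  have h3 := pv_sum_tail (L - M) (L : Int)
  have hcast : ((L - M : Nat) : Int) = (L : Int) - (M : Int) := by
    exact_mod_cast Int.ofNat_sub hML
  rw [hcast] at h3
  have hidx : (L : Int) - ((L : Int) - (M : Int)) + 1 = (M : Int) + 1 := by ring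
  rw [hidx] at h3
  set S : Int := ((PySem.List.pyRange ((M : Int) + 1) ((L : Int) + 1)).map
      (fun i => (L : Int) - i + 1)).sum with hS
  have hfd : PySem.Int.floordiv (((L : Int) - (M : Int)) * ((L : Int) - (M : Int) + 1)) 2 = S := by
    rw [PySem.Int.floordiv_eq_iff_of_pos (by norm_num)]
    constructor <;> nlinarith [h3]
  rw [h1, h2, hm, hfd]
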